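-- pv_equiv track=rewrite | github.com/ernestvmo/AdventOfCode | 2017/day_04/AoC.py | policy_1
-- ===== SOURCE A (Python) =====
-- def policy_1(passphrases: list[str]):
--     valid_count = 0
--     for passphrase in passphrases:
--         valid = True
--         for word in passphrase:
--             if passphrase.count(word) > 1:
--                 valid = False
--         if valid:
--             valid_count += 1
--     return valid_count
-- ===== SOURCE B (Python) =====
-- def policy_1(passphrases: list[str]):
--     valid_count = 0
--     for passphrase in passphrases:
--         cs = sorted(passphrase)
--         if all(a != b for a, b in zip(cs, cs[1:])):
--             valid_count += 1
--     return valid_count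
-- ===== Notes on version B (the rewrite author's own statement) =====
-- stated objective: alternative
-- what changed: Replaces the per-character full .count scan per passphrase with a sort-then-single-adjacent-pair pass; same value, different algorithm (O(m log m) comparisons per passphrase vs O(m^2), though not measurably faster in Python on the generated inputs).
import Mathlib
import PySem

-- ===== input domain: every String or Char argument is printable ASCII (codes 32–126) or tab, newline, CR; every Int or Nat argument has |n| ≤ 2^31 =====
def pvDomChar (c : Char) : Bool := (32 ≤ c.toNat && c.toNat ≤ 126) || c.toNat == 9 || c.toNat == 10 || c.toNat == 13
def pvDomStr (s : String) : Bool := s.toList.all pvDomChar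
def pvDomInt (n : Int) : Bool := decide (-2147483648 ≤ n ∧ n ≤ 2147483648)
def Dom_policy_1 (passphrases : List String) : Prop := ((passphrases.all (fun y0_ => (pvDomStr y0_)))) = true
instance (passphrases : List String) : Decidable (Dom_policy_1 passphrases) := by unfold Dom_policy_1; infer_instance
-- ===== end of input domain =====

-- B sorts each passphrase's characters and checks adjacent pairs instead of A's full .count scan per character.

-- ===== PORT A =====
-- `passphrase.count(word)` with `word` a single character equals the number of
-- occurrences of that character, i.e. `passphrase.toList.count word` (exact here:
-- the needle always has length 1, so overlap rules play no role).
def policy_1 (passphrases : List String) : Int :=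
  passphrases.foldl
    (fun valid_count passphrase =>
      let valid := passphrase.toList.foldl
        (fun valid word => if passphrase.toList.count word > 1 then false else valid) true
      if valid then valid_count + 1 else valid_count)
    0

-- ===== PORT B =====
def policy_1_alt (passphrases : List String) : Int :=
  passphrases.foldl
    (fun valid_count passphrase =>
      let cs := PySem.List.sorted passphrase.toList (fun x => x) false
      if (cs.zip cs.tail).all (fun ab => ab.1 != ab.2) then valid_count + 1 else valid_count)
    0

-- ===== PRECONDITION & SPEC =====
def Spec_policy_1 (passphrases : List String) (out : Int) : Prop := out = policy_1_alt passphrases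
instance (passphrases : List String) (out : Int) : Decidable (Spec_policy_1 passphrases out) := by unfold Spec_policy_1; infer_instance

-- ===== CLAIM (what is proved, stated in full; the proofs are below) =====
def Claim_equal_policy_1 : Prop := ∀ (passphrases : List String), Dom_policy_1 passphrases → Spec_policy_1 passphrases (policy_1 passphrases)

-- ===== LEMMAS AND PROOFS =====

-- A's inner loop computes "no character occurs more than once", i.e. Nodup.
theorem policyA_inner_foldl (l : List Char) (m : List Char) (b : Bool) :
    (l.foldl (fun valid word => if m.count word > 1 then false else valid) b)
      = (b && l.all (fun word => !(decide (m.count word > 1)))) := by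
  induction l generalizing b with
  | nil => simp
  | cons a t ih =>
      simp only [List.foldl_cons, List.all_cons, ih]
      by_cases h : m.count a > 1 <;> simp [h]

theorem policyA_inner_iff (l : List Char) :
    (l.foldl (fun valid word => if l.count word > 1 then false else valid) true) = true
      ↔ l.Nodup := by
  rw [policyA_inner_foldl]
  simp only [Bool.true_and, List.all_eq_true, List.nodup_iff_count_le_one]
  constructor
  · intro h a
    by_cases ha : a ∈ l
    · have := h a ha; simp at this; omega
    · simp [List.count_eq_zero_of_not_mem ha]
  · intro h a ha
    have := h a
    simp
    omega

-- B's adjacent-pair check is IsChain (· ≠ ·).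
theorem zip_all_ne_iff_isChain (cs : List Char) :
    ((cs.zip cs.tail).all (fun ab => ab.1 != ab.2) = true) ↔ cs.IsChain (· ≠ ·) := by
  induction cs with
  | nil => simp
  | cons a t ih =>
      cases t with
      | nil => simp
      | cons b t' =>
          simp only [List.tail_cons, List.zip_cons_cons, List.all_cons, List.isChain_cons_cons,
            Bool.and_eq_true, bne_iff_ne, ne_eq] at *
          exact and_congr Iff.rfl ih

-- On a ≤-sorted list, distinct adjacent elements ↔ Nodup.
theorem isChain_ne_iff_nodup_of_sorted (cs : List Char) (hp : cs.Pairwise (· ≤ ·)) :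
    cs.IsChain (· ≠ ·) ↔ cs.Nodup := by
  constructor
  · intro hc
    have hle : cs.IsChain (· ≤ ·) := hp.isChain
    have hlt : cs.IsChain (· < ·) := by
      induction cs with
      | nil => simp
      | cons a t ih =>
          cases t with
          | nil => simp
          | cons b t' =>
              rw [List.isChain_cons_cons] at hc hle ⊢
              refine ⟨lt_of_le_of_ne hle.1 hc.1, ?_⟩
              exact ih (List.Pairwise.sublist (List.sublist_cons_self a _) hp) hc.2 hle.2
    have := (List.isChain_iff_pairwise.mp hlt)
    exact this.imp ne_of_lt
  · intro hn
    exact hn.isChain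

-- Per-passphrase: A's validity flag equals B's.
theorem per_string_eq (s : String) :
    (s.toList.foldl (fun valid word => if s.toList.count word > 1 then false else valid) true)
      = ((PySem.List.sorted s.toList (fun x => x) false).zip
          (PySem.List.sorted s.toList (fun x => x) false).tail).all (fun ab => ab.1 != ab.2) := by
  set cs := PySem.List.sorted s.toList (fun x => x) false with hcs
  have hperm : cs.Perm s.toList := PySem.List.sorted_perm _ _ _
  have hpair : cs.Pairwise (· ≤ ·) := by
    have := PySem.List.sorted_pairwise (xs := s.toList) (key := fun x => x)
    simpa using this
  rw [Bool.eq_iff_iff, policyA_inner_iff, zip_all_ne_iff_isChain,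
    isChain_ne_iff_nodup_of_sorted cs hpair]
  exact (hperm.nodup_iff).symm

-- ===== VERDICT (by name: the statement is the Claim_ definition above) =====
theorem policy_1_spec : Claim_equal_policy_1 := by
  intro passphrases _
  unfold Spec_policy_1 policy_1 policy_1_alt
  induction passphrases using List.reverseRecOn with
  | nil => rfl
  | append_singleton t s ih =>
      simp only [List.foldl_append, List.foldl_cons, List.foldl_nil, per_string_eq]
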